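-- pv_equiv track=rewrite | github.com/bayuncao/lanalyzer | lanalyzer/analysis/call_chain.py | _find_var_path
-- ===== SOURCE A (Python) =====
-- from typing import Any, Dict, List, Set, Optional, Tuple
--
-- def _find_var_path(
--
--     start_var: str,
--     target_var: str,
--     var_map: Dict[str, Dict[str, Any]],
--     visited: Set[str],
-- ) -> List[str]:
--     """
--     使用广度优先搜索找出从起始变量到目标变量的路径
--
--     Args:
--         start_var: 起始变量名
--         target_var: 目标变量名
--         var_map: 变量映射关系
--         visited: 已访问的变量集合
--
--     Returns:
--         变量名列表，表示从start_var到target_var的路径，如果没有路径则返回空列表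
--     """
--     if start_var == target_var:
--         return [start_var]
--
--     queue = [(start_var, [start_var])]
--
--     while queue:
--         current_var, path = queue.pop(0)
--
--         # 找出所有从current_var派生的变量
--         for var_name, info in var_map.items():
--             if info.get("from_var") == current_var and var_name not in visited:
--                 new_path = path + [var_name]
--
--                 if var_name == target_var:
--                     return new_path
--
--                 visited.add(var_name)
--                 queue.append((var_name, new_path))
--
--     return []  # 没找到路径
-- ===== SOURCE B (Python) =====
-- from typing import Any, Dict, List, Set
--
--
-- def _find_var_path(
--     start_var: str,
--     target_var: str,
--     var_map: Dict[str, Dict[str, Any]],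
--     visited: Set[str],
-- ) -> List[str]:
--     if start_var == target_var:
--         return [start_var]
--
--     # Precompute from_var -> [derived vars] adjacency once, in var_map order.
--     children: Dict[str, List[str]] = {}
--     for var_name, info in var_map.items():
--         fv = info.get("from_var")
--         if fv is not None:
--             children.setdefault(fv, []).append(var_name)
--
--     # BFS over an index-cursor queue of (var, parent_index); no path copies:
--     # the path is reconstructed from parent pointers only when the target is found.
--     entries = [(start_var, -1)]
--     i = 0
--     while i < len(entries):
--         cur = entries[i][0]
--         for v in children.get(cur, []):
--             if v in visited:
--                 continue
--             if v == target_var: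
--                 path = [v]
--                 j = i
--                 while j != -1:
--                     path.append(entries[j][0])
--                     j = entries[j][1]
--                 return path[::-1]
--             visited.add(v)
--             entries.append((v, i))
--         i += 1
--     return []
-- ===== Notes on version B (the rewrite author's own statement) =====
-- stated objective: alternative
-- what changed: B precomputes a from_var->children adjacency dict once and runs BFS over an index-cursor queue of (var, parent_index) pairs, reconstructing the path from parent pointers only when the target is found, instead of A's per-node rescan of the whole var_map with a full path copied into every queue entry.
import Mathlib
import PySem

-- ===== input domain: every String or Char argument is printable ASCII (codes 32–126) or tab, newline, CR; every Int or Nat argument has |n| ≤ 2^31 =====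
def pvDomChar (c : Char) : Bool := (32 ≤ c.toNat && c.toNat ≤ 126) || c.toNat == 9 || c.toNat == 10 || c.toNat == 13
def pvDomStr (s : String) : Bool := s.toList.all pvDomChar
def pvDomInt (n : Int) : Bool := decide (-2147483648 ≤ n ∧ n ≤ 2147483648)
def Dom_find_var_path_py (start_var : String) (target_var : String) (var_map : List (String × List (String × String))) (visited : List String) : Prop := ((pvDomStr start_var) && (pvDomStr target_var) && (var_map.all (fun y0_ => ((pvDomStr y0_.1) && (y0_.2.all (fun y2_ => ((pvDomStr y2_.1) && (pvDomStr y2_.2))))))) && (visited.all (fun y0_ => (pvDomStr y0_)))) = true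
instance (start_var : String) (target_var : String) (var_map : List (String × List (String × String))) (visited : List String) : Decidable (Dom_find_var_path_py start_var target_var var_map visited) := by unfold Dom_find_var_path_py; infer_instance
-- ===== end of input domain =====

-- B precomputes a from_var→children adjacency dict once and runs BFS on an index-cursor
-- queue of (var, parent-index) pairs, rebuilding the path from parent pointers only at the
-- end, instead of A's per-node rescan of var_map with a path copy in every queue entry
-- (objective: alternative). Both Pythons mutate `visited` identically; the equivalence
-- proved here is about the return value.

-- ===== PORT A =====
-- inner `for var_name, info in var_map.items(): …` of one while-iteration; returns
-- (early-return value if any, visited, queue)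
def pvAScan (cur : String) (tgt : String) (items : List (String × List (String × String)))
    (vis : List String) (path : List String) (q : List (String × List String)) :
    Option (List String) × List String × List (String × List String) :=
  match items with
  | [] => (none, vis, q)
  | (v, info) :: rest =>
    if (List.lookup "from_var" info == some cur) && !(PySem.Set.contains vis v) then
      let np := path ++ [v]
      if v == tgt then (some np, vis, q)
      else pvAScan cur tgt rest (PySem.Set.add vis v) path (q ++ [(v, np)])
    else pvAScan cur tgt rest vis path q

-- `while queue:` — fuel var_map.length + 1 covers every iteration: each pop beyond the
-- first was enqueued together with adding a fresh var (a key of var_map) to visited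
def pvALoop (fuel : Nat) (tgt : String) (vm : List (String × List (String × String)))
    (vis : List String) (q : List (String × List String)) : List String :=
  match fuel with
  | 0 => []
  | fuel + 1 =>
    match q with
    | [] => []
    | (cur, path) :: rest =>
      match pvAScan cur tgt vm vis path rest with
      | (some np, _, _) => np
      | (none, vis', q') => pvALoop fuel tgt vm vis' q'

def find_var_path_py (start_var : String) (target_var : String) (var_map : List (String × List (String × String))) (visited : List String) : List String :=
  if start_var == target_var then [start_var]
  else pvALoop (var_map.length + 1) target_var var_map visited [(start_var, [start_var])]

-- ===== PORT B =====
-- children = {}; for v, info in var_map.items(): fv = info.get("from_var");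
--   if fv is not None: children.setdefault(fv, []).append(v)
def pvBuildAdj (vm : List (String × List (String × String))) : PySem.Dict String (List String) :=
  vm.foldl (fun d p =>
    match List.lookup "from_var" p.2 with
    | none => d
    | some fv => d.modify fv [] (· ++ [p.1])) PySem.Dict.empty

-- path = [v]; j = i; while j != -1: path.append(entries[j][0]); j = entries[j][1]
-- (python's -1 sentinel is Option.none; the chain is strictly descending, so fuel j+1
-- covers every iteration)
def pvRebuild (entries : List (String × Option Nat)) : Nat → Nat → List String → List String
  | 0, _, acc => acc
  | fuel + 1, j, acc =>
    match entries[j]? with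
    | none => acc
    | some (v, none) => acc ++ [v]
    | some (v, some pj) => pvRebuild entries fuel pj (acc ++ [v])

-- inner `for v in children.get(cur, []): …` at cursor i; returns
-- (early-return value if any, entries, visited)
def pvBScan (tgt : String) (children : List String) (entries : List (String × Option Nat))
    (i : Nat) (vis : List String) :
    Option (List String) × List (String × Option Nat) × List String :=
  match children with
  | [] => (none, entries, vis)
  | v :: rest =>
    if PySem.Set.contains vis v then pvBScan tgt rest entries i vis
    else if v == tgt then (some (pvRebuild entries (i + 1) i [v]).reverse, entries, vis)
    else pvBScan tgt rest (entries ++ [(v, some i)]) i (PySem.Set.add vis v)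

-- `while i < len(entries):` — same fuel bound as A's loop (entries gains only fresh vars)
def pvBLoop (fuel : Nat) (adj : PySem.Dict String (List String)) (tgt : String)
    (entries : List (String × Option Nat)) (i : Nat) (vis : List String) : List String :=
  match fuel with
  | 0 => []
  | fuel + 1 =>
    if i < entries.length then
      let cur := (entries.getD i ("", none)).1
      match pvBScan tgt (adj.getD cur []) entries i vis with
      | (some p, _, _) => p
      | (none, entries', vis') => pvBLoop fuel adj tgt entries' (i + 1) vis'
    else []

def find_var_path_py_alt (start_var : String) (target_var : String) (var_map : List (String × List (String × String))) (visited : List String) : List String :=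
  if start_var == target_var then [start_var]
  else pvBLoop (var_map.length + 1) (pvBuildAdj var_map) target_var [(start_var, none)] 0 visited

-- ===== PRECONDITION & SPEC =====
def Spec_find_var_path_py (start_var : String) (target_var : String) (var_map : List (String × List (String × String))) (visited : List String) (out : List String) : Prop := out = find_var_path_py_alt start_var target_var var_map visited
instance (start_var : String) (target_var : String) (var_map : List (String × List (String × String))) (visited : List String) (out : List String) : Decidable (Spec_find_var_path_py start_var target_var var_map visited out) := by unfold Spec_find_var_path_py; infer_instance

-- ===== CLAIM (what is proved, stated in full; the proofs are below) =====
def Claim_equal_find_var_path_py : Prop := ∀ (start_var : String) (target_var : String) (var_map : List (String × List (String × String))) (visited : List String), Dom_find_var_path_py start_var target_var var_map visited → Spec_find_var_path_py start_var target_var var_map visited (find_var_path_py start_var target_var var_map visited)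

-- ===== LEMMAS AND PROOFS =====

-- the children of `cur`, in var_map order: what A's inner scan keeps
def pvChildren (vm : List (String × List (String × String))) (cur : String) : List String :=
  (vm.filter (fun p => List.lookup "from_var" p.2 == some cur)).map (·.1)

-- canonical path of entry j, rebuilt from parent pointers (fuel-indexed)
def pvChain (entries : List (String × Option Nat)) : Nat → Nat → List String
  | 0, _ => []
  | fuel + 1, j =>
    match entries[j]? with
    | none => []
    | some (v, none) => [v]
    | some (v, some pj) => pvChain entries fuel pj ++ [v]

-- parent pointers point strictly backwards
def pvWF (entries : List (String × Option Nat)) : Prop :=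
  ∀ (j : Nat) (x : String × Option Nat), entries[j]? = some x → ∀ p, x.2 = some p → p < j

-- A's queue entry for index j, and the whole pending part of B's queue as A sees it
def pvAbs (entries : List (String × Option Nat)) (i : Nat) : List (String × List String) :=
  (List.range' i (entries.length - i)).map
    (fun j => ((entries.getD j ("", none)).1, pvChain entries (j + 1) j))

theorem pvBuildAdj_getD (vm : List (String × List (String × String))) (d : PySem.Dict String (List String)) (cur : String) :
    (vm.foldl (fun d p =>
      match List.lookup "from_var" p.2 with
      | none => d
      | some fv => d.modify fv [] (· ++ [p.1])) d).getD cur [] = d.getD cur [] ++ pvChildren vm cur := by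
  induction vm generalizing d with
  | nil => simp [pvChildren]
  | cons p rest ih =>
    cases h : List.lookup "from_var" p.2 with
    | none =>
      simp only [List.foldl_cons, h, pvChildren, List.filter_cons] at *
      simp [ih]
    | some fv =>
      simp only [List.foldl_cons, h, pvChildren, List.filter_cons] at *
      rw [ih]
      by_cases hc : cur = fv
      · subst hc
        simp
      · simp [PySem.Dict.getD_modify, hc, Ne.symm hc]

theorem pvChain_append (entries l : List (String × Option Nat)) (hwf : pvWF entries) :
    ∀ fuel j, j < entries.length → pvChain (entries ++ l) fuel j = pvChain entries fuel j := by
  intro fuel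
  induction fuel with
  | zero => intro j _; rfl
  | succ f ih =>
    intro j hj
    have hget : (entries ++ l)[j]? = entries[j]? := List.getElem?_append_left hj
    cases hx : entries[j]? with
    | none => simp [pvChain, hget, hx]
    | some x =>
      obtain ⟨v, p⟩ := x
      cases p with
      | none => simp [pvChain, hget, hx]
      | some pj =>
        have hpj : pj < entries.length := lt_trans (hwf j _ hx pj rfl) hj
        simp [pvChain, hget, hx, ih pj hpj]

theorem pvChain_fuel (entries : List (String × Option Nat)) (hwf : pvWF entries) :
    ∀ j f₁ f₂, j < f₁ → j < f₂ → pvChain entries f₁ j = pvChain entries f₂ j := by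
  intro j
  induction j using Nat.strong_induction_on with
  | _ j ih =>
    intro f₁ f₂ h1 h2
    obtain ⟨g₁, rfl⟩ : ∃ g, f₁ = g + 1 := ⟨f₁ - 1, by omega⟩
    obtain ⟨g₂, rfl⟩ : ∃ g, f₂ = g + 1 := ⟨f₂ - 1, by omega⟩
    cases hx : entries[j]? with
    | none => simp [pvChain, hx]
    | some x =>
      obtain ⟨v, p⟩ := x
      cases p with
      | none => simp [pvChain, hx]
      | some pj =>
        have hlt : pj < j := hwf j _ hx pj rfl
        simp [pvChain, hx, ih pj hlt g₁ g₂ (by omega) (by omega)]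

theorem pvWF_append (entries : List (String × Option Nat)) (v : String) (i : Nat)
    (hwf : pvWF entries) (hi : i < entries.length) : pvWF (entries ++ [(v, some i)]) := by
  unfold pvWF
  intro j x hx p hp
  by_cases hj : j < entries.length
  · exact hwf j x (by rwa [List.getElem?_append_left hj] at hx) p hp
  · have hjlen : j < entries.length + 1 := by
      have := (List.getElem?_eq_some_iff.mp hx).1
      simpa using this
    have hje : j = entries.length := by omega
    subst hje
    rw [List.getElem?_append_right (le_refl _)] at hx
    simp at hx
    rw [← hx] at hp
    simp at hp
    omega

theorem pvRebuild_eq (entries : List (String × Option Nat)) :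
    ∀ fuel j acc, pvRebuild entries fuel j acc = acc ++ (pvChain entries fuel j).reverse := by
  intro fuel
  induction fuel with
  | zero => intro j acc; simp [pvRebuild, pvChain]
  | succ f ih =>
    intro j acc
    cases hx : entries[j]? with
    | none => simp [pvRebuild, pvChain, hx]
    | some x =>
      obtain ⟨v, p⟩ := x
      cases p with
      | none => simp [pvRebuild, pvChain, hx]
      | some pj => simp [pvRebuild, pvChain, hx, ih]

theorem pvAbs_cons (entries : List (String × Option Nat)) (i : Nat) (hi : i < entries.length) :
    pvAbs entries i =
      ((entries.getD i ("", none)).1, pvChain entries (i + 1) i) :: pvAbs entries (i + 1) := by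
  unfold pvAbs
  have h1 : entries.length - i = (entries.length - (i + 1)) + 1 := by omega
  rw [h1, List.range'_succ]
  simp

theorem pvAbs_nil (entries : List (String × Option Nat)) (i : Nat) (hi : ¬ i < entries.length) :
    pvAbs entries i = [] := by
  unfold pvAbs
  have : entries.length - i = 0 := by omega
  simp [this]

theorem pvAbs_append (entries : List (String × Option Nat)) (v : String) (i k : Nat)
    (hwf : pvWF entries) (hi : i < entries.length) (hk : k ≤ entries.length) :
    pvAbs (entries ++ [(v, some i)]) k =
      pvAbs entries k ++ [(v, pvChain entries (i + 1) i ++ [v])] := by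
  unfold pvAbs
  have h1 : (entries ++ [(v, some i)]).length - k = (entries.length - k) + 1 := by
    simp; omega
  rw [h1, List.range'_concat]
  have hlast : k + 1 * (entries.length - k) = entries.length := by omega
  rw [hlast, List.map_append]
  congr 1
  · apply List.map_congr_left
    intro j hj
    have hjlt : j < entries.length := by
      have := List.mem_range'.mp hj
      omega
    have hgd : (entries ++ [(v, some i)]).getD j ("", none) = entries.getD j ("", none) := by
      simp [List.getD_eq_getElem?_getD, List.getElem?_append_left hjlt]
    rw [hgd, pvChain_append entries [(v, some i)] hwf (j + 1) j hjlt]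
  · have hgd : (entries ++ [(v, some i)]).getD entries.length ("", none) = (v, some i) := by
      simp [List.getD_eq_getElem?_getD]
    have hch : pvChain (entries ++ [(v, some i)]) (entries.length + 1) entries.length
        = pvChain entries (i + 1) i ++ [v] := by
      have hget : (entries ++ [(v, some i)])[entries.length]? = some (v, some i) := by
        rw [List.getElem?_append_right (le_refl entries.length)]
        simp
      rw [show pvChain (entries ++ [(v, some i)]) (entries.length + 1) entries.length
            = pvChain (entries ++ [(v, some i)]) entries.length i ++ [v] by
          simp [pvChain]]
      rw [pvChain_append entries [(v, some i)] hwf entries.length i hi,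
        pvChain_fuel entries hwf i entries.length (i + 1) hi (by omega)]
    simp [hch]

-- A's inner scan over the whole var_map ≍ B's inner scan over cur's children with
-- parent-pointer entries: same early return, same visited, and B's new entries
-- abstract to A's new queue
theorem pvScan_corr (tgt cur : String) (i : Nat) :
    ∀ (items : List (String × List (String × String))) (entries : List (String × Option Nat))
      (vis : List String), pvWF entries → i < entries.length →
    pvAScan cur tgt items vis (pvChain entries (i + 1) i) (pvAbs entries (i + 1)) =
      ((pvBScan tgt (pvChildren items cur) entries i vis).1,
       (pvBScan tgt (pvChildren items cur) entries i vis).2.2,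
       pvAbs (pvBScan tgt (pvChildren items cur) entries i vis).2.1 (i + 1)) := by
  intro items
  induction items with
  | nil => intro entries vis _ _; simp [pvAScan, pvChildren, pvBScan]
  | cons p rest ih =>
    intro entries vis hwf hi
    obtain ⟨v, info⟩ := p
    by_cases hf : List.lookup "from_var" info = some cur
    · have hch : pvChildren ((v, info) :: rest) cur = v :: pvChildren rest cur := by
        simp [pvChildren, hf]
      by_cases hv : v ∈ vis
      · simp [pvAScan, hch, hf, hv, pvBScan, PySem.Set.contains, ih entries vis hwf hi]
      · by_cases ht : v = tgt
        · subst ht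
          have hrb : (pvRebuild entries (i + 1) i [v]).reverse
              = pvChain entries (i + 1) i ++ [v] := by
            rw [pvRebuild_eq]
            simp
          simp [pvAScan, hch, hf, hv, pvBScan, PySem.Set.contains, hrb]
        · have hwf' : pvWF (entries ++ [(v, some i)]) := pvWF_append entries v i hwf hi
          have hi' : i < (entries ++ [(v, some i)]).length := by simp; omega
          have hpath : pvChain entries (i + 1) i
              = pvChain (entries ++ [(v, some i)]) (i + 1) i :=
            (pvChain_append entries [(v, some i)] hwf (i + 1) i hi).symm
          have hq : pvAbs entries (i + 1)
                ++ [(v, pvChain (entries ++ [(v, some i)]) (i + 1) i ++ [v])]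
              = pvAbs (entries ++ [(v, some i)]) (i + 1) := by
            rw [← hpath]
            exact (pvAbs_append entries v i (i + 1) hwf hi (by omega)).symm
          have hcv : PySem.Set.contains vis v = false := by
            simp [PySem.Set.contains, hv]
          have hbt : (v == tgt) = false := by
            simp [ht]
          have hbf : (List.lookup "from_var" info == some cur) = true := by
            simp [hf]
          simp only [pvAScan, hch, pvBScan, hcv, hbt, hbf, Bool.not_false, Bool.and_true,
            Bool.false_eq_true, if_false, if_true]
          rw [hpath, hq]
          exact ih (entries ++ [(v, some i)]) (PySem.Set.add vis v) hwf' hi'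
    · have hch : pvChildren ((v, info) :: rest) cur = pvChildren rest cur := by
        simp [pvChildren, hf]
      simp [pvAScan, hch, hf, ih entries vis hwf hi]

theorem pvBScan_wf (tgt : String) (i : Nat) :
    ∀ (children : List String) (entries : List (String × Option Nat)) (vis : List String),
      pvWF entries → i < entries.length →
      pvWF (pvBScan tgt children entries i vis).2.1 ∧
        i < (pvBScan tgt children entries i vis).2.1.length := by
  intro children
  induction children with
  | nil => intro entries vis hwf hi; exact ⟨hwf, hi⟩
  | cons v rest ih =>
    intro entries vis hwf hi
    by_cases hv : v ∈ vis
    · simpa [pvBScan, PySem.Set.contains, hv] using ih entries vis hwf hi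
    · by_cases ht : v = tgt
      · subst ht
        simpa [pvBScan, PySem.Set.contains, hv] using And.intro hwf hi
      · have hwf' : pvWF (entries ++ [(v, some i)]) := pvWF_append entries v i hwf hi
        have hi' : i < (entries ++ [(v, some i)]).length := by simp; omega
        simpa [pvBScan, PySem.Set.contains, hv, ht] using
          ih (entries ++ [(v, some i)]) (PySem.Set.add vis v) hwf' hi'

-- both outer loops agree step by step through the abstraction
theorem pvLoop_corr (tgt : String) (vm : List (String × List (String × String))) :
    ∀ (fuel : Nat) (entries : List (String × Option Nat)) (i : Nat) (vis : List String),
      pvWF entries →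
      pvALoop fuel tgt vm vis (pvAbs entries i) = pvBLoop fuel (pvBuildAdj vm) tgt entries i vis := by
  intro fuel
  induction fuel with
  | zero => intro entries i vis _; simp [pvALoop, pvBLoop]
  | succ n ih =>
    intro entries i vis hwf
    by_cases hi : i < entries.length
    · rw [pvAbs_cons entries i hi]
      have hadj : (pvBuildAdj vm).getD ((entries.getD i ("", none)).1) [] =
          pvChildren vm ((entries.getD i ("", none)).1) := by
        simpa [PySem.Dict.getD_empty] using
          pvBuildAdj_getD vm PySem.Dict.empty ((entries.getD i ("", none)).1)
      show (match pvAScan ((entries.getD i ("", none)).1) tgt vm vis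
              (pvChain entries (i + 1) i) (pvAbs entries (i + 1)) with
            | (some np, _, _) => np
            | (none, vis', q') => pvALoop n tgt vm vis' q') = _
      rw [pvScan_corr tgt ((entries.getD i ("", none)).1) i vm entries vis hwf hi]
      have hwfl := pvBScan_wf tgt i (pvChildren vm ((entries.getD i ("", none)).1)) entries vis hwf hi
      unfold pvBLoop
      rw [if_pos hi]
      simp only [hadj]
      cases hbs : pvBScan tgt (pvChildren vm ((entries.getD i ("", none)).1)) entries i vis with
      | mk r s =>
        obtain ⟨es', vs'⟩ := s
        rw [hbs] at hwfl
        cases r with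
        | some p => simp
        | none => simpa using ih es' (i + 1) vs' hwfl.1
    · rw [pvAbs_nil entries i hi]
      unfold pvALoop pvBLoop
      rw [if_neg hi]

theorem pvWF_init (s : String) : pvWF [(s, none)] := by
  unfold pvWF
  intro j x hx p hp
  cases j with
  | zero => simp at hx; rw [← hx] at hp; simp at hp
  | succ n => simp at hx

theorem pvAbs_init (s : String) : pvAbs [(s, none)] 0 = [(s, [s])] := by
  simp [pvAbs, pvChain]

-- ===== VERDICT (by name: the statement is the Claim_ definition above) =====
theorem find_var_path_py_spec : Claim_equal_find_var_path_py := by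
  intro s t vm vis _
  unfold Spec_find_var_path_py find_var_path_py find_var_path_py_alt
  by_cases h : s == t
  · simp [h]
  · rw [if_neg (by simp_all), if_neg (by simp_all), ← pvAbs_init s,
      pvLoop_corr t vm (vm.length + 1) [(s, none)] 0 vis (pvWF_init s)]
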